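-- pv_equiv track=rewrite | github.com/aliramazon/daily-dsa-python | 03_rotate-left-till-zero.py | rotate_left_till_zero_v3
-- ===== SOURCE A (Python) =====
-- def rotate_left_till_zero_v3(numbers):
--     result = []
--     offset = 0
--
--     for idx, value in enumerate(numbers):
--         if value == 0:
--             offset = idx
--         result.append(None)
--
--     for idx, value in enumerate(numbers):
--         new_pos = (idx - offset + len(numbers)) % len(numbers)
--         result[new_pos] = value
--     return result
-- ===== SOURCE B (Python) =====
-- def rotate_left_till_zero_v3(numbers):
--     offset = 0
--     for idx, value in enumerate(numbers):
--         if value == 0: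
--             offset = idx
--     return list(numbers[offset:]) + list(numbers[:offset])
-- ===== Notes on version B (the rewrite author's own statement) =====
-- stated objective: simpler
-- what changed: B keeps the single scan for the last zero's index but replaces A's preallocated result list and second per-element modular-placement loop by one slice concatenation numbers[offset:] + numbers[:offset].
import Mathlib
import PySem

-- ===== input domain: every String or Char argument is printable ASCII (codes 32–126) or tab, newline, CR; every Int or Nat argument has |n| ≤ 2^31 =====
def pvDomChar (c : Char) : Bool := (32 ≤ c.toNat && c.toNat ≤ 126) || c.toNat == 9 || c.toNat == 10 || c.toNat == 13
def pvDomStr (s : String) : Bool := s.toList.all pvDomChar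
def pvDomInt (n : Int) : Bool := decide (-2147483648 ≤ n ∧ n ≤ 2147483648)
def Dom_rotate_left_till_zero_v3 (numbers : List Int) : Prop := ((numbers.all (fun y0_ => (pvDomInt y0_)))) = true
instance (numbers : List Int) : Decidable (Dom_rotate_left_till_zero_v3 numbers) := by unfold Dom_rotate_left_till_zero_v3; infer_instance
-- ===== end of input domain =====

-- B replaces A's second loop (per-element modular placement into a preallocated list)
-- by a single slice concatenation numbers[offset:] + numbers[:offset] — simpler.

-- ===== PORT A =====
-- result = [None]*len(numbers): placeholder 0 is exact because the second loop
-- overwrites every position (the placement map is a bijection on [0, n)).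
def rotate_left_till_zero_v3 (numbers : List Int) : List Int :=
  let result : List Int := numbers.map (fun _ => 0)
  let offset : Int :=
    (PySem.List.enumerate numbers).foldl (fun off p => if p.2 = 0 then p.1 else off) 0
  (PySem.List.enumerate numbers).foldl
    (fun res p =>
      res.set (PySem.Int.mod (p.1 - offset + (numbers.length : Int)) (numbers.length : Int)).toNat p.2)
    result

-- ===== PORT B =====
def rotate_left_till_zero_v3_alt (numbers : List Int) : List Int :=
  let offset : Int :=
    (PySem.List.enumerate numbers).foldl (fun off p => if p.2 = 0 then p.1 else off) 0
  PySem.List.slice numbers (some offset) none ++ PySem.List.slice numbers none (some offset)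

-- ===== PRECONDITION & SPEC =====
def Spec_rotate_left_till_zero_v3 (numbers : List Int) (out : List Int) : Prop := out = rotate_left_till_zero_v3_alt numbers
instance (numbers : List Int) (out : List Int) : Decidable (Spec_rotate_left_till_zero_v3 numbers out) := by unfold Spec_rotate_left_till_zero_v3; infer_instance

-- ===== CLAIM (what is proved, stated in full; the proofs are below) =====
def Claim_equal_rotate_left_till_zero_v3 : Prop := ∀ (numbers : List Int), Dom_rotate_left_till_zero_v3 numbers → Spec_rotate_left_till_zero_v3 numbers (rotate_left_till_zero_v3 numbers)

-- ===== LEMMAS AND PROOFS =====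

-- The offset loop yields 0 or an index of the list.
theorem offset_cases (xs : List Int) (s acc : Int) :
    (PySem.List.enumerate xs s).foldl (fun off p => if p.2 = 0 then p.1 else off) acc = acc ∨
      ∃ k : Nat, k < xs.length ∧
        (PySem.List.enumerate xs s).foldl (fun off p => if p.2 = 0 then p.1 else off) acc = s + (k : Int) := by
  induction xs generalizing s acc with
  | nil => simp [PySem.List.enumerate_nil]
  | cons x t ih =>
    rw [PySem.List.enumerate_cons]
    simp only [List.foldl_cons]
    rcases ih (s + 1) (if ((s, x) : Int × Int).2 = 0 then ((s, x) : Int × Int).1 else acc) with h | ⟨k, hk, h⟩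
    · by_cases hx : x = 0
      · right; exact ⟨0, by simp, by rw [h]; simp [hx]⟩
      · left; rw [h]; simp [hx]
    · right; exact ⟨k + 1, by simpa using hk, by rw [h]; omega⟩

theorem offset_range (xs : List Int) :
    ∃ k : Nat, (k < xs.length ∨ (k = 0 ∧ xs.length = 0)) ∧
      (PySem.List.enumerate xs 0).foldl (fun off p => if p.2 = 0 then p.1 else off) 0 = (k : Int) := by
  rcases offset_cases xs 0 0 with h | ⟨k, hk, h⟩
  · cases xs with
    | nil => exact ⟨0, Or.inr ⟨rfl, rfl⟩, by simpa using h⟩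
    | cons x t => exact ⟨0, Or.inl (by simp), by simpa using h⟩
  · exact ⟨k, Or.inl hk, by simpa using h⟩

theorem length_foldl_set {β : Type} (l : List β) (f : β → Nat) (g : β → Int) (res : List Int) :
    (l.foldl (fun r p => r.set (f p) (g p)) res).length = res.length := by
  induction l generalizing res with
  | nil => rfl
  | cons p t ih => simpa using ih (res.set (f p) (g p))

-- last-write-wins lookup for a fold of List.set
theorem foldl_set_getElem? {β : Type} (f : β → Nat) (g : β → Int) (l : List β)
    (res : List Int) (j : Nat) (hj : j < res.length) :
    (l.foldl (fun r p => r.set (f p) (g p)) res)[j]? =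
      (match l.reverse.find? (fun p => f p == j) with
       | some p => some (g p)
       | none => res[j]?) := by
  induction l generalizing res with
  | nil => simp
  | cons p t ih =>
    simp only [List.foldl_cons, List.reverse_cons, List.find?_append]
    rw [ih (res.set (f p) (g p)) (by simpa using hj)]
    cases hfind : t.reverse.find? (fun q => f q == j) with
    | some q => simp
    | none =>
      simp only [Option.or_none]
      by_cases hpj : f p = j
      · simp [hpj, List.getElem?_set, hj]
      · simp [List.getElem?_set, hpj, Ne.symm hpj]

theorem find?_of_unique {α : Type} (l : List α) (p : α → Bool) (x : α)
    (hx : x ∈ l) (hpx : p x = true) (huniq : ∀ y ∈ l, p y = true → y = x) :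
    l.find? p = some x := by
  induction l with
  | nil => cases hx
  | cons a t ih =>
    by_cases hpa : p a = true
    · have : a = x := huniq a (by simp) hpa
      rw [List.find?_cons_of_pos hpa, this]
    · have hxt : x ∈ t := by
        rcases List.mem_cons.mp hx with rfl | h
        · exact absurd hpx hpa
        · exact h
      rw [List.find?_cons_of_neg hpa]
      exact ih hxt (fun y hy hpy => huniq y (List.mem_cons_of_mem _ hy) hpy)

-- placement arithmetic: for 0 ≤ i < n, 0 ≤ k < n, ((i - k + n) mod n) = j ↔ …
theorem emod_small_cases (a n : Int) (hn : 0 < n) (h0 : 0 ≤ a) (h2 : a < 2 * n) :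
    a % n = if a < n then a else a - n := by
  split_ifs with h
  · exact Int.emod_eq_of_lt h0 h
  · have : a % n = (a - n) % n := by
      conv_lhs => rw [show a = (a - n) + n * 1 by ring]
      rw [Int.add_mul_emod_self_left]
    rw [this]
    exact Int.emod_eq_of_lt (by omega) (by omega)

theorem placement_eq_iff (i k j n : Nat) (hi : i < n) (hk : k < n) (hj : j < n) :
    ((i : Int) - (k : Int) + (n : Int)) % (n : Int) = (j : Int) ↔ i = (j + k) % n := by
  have hn : (0 : Int) < n := by exact_mod_cast Nat.zero_lt_of_lt hi
  rw [emod_small_cases ((i : Int) - k + n) n hn (by omega) (by push_cast; omega)]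
  have hjk : (j + k) % n = if j + k < n then j + k else j + k - n := by
    split_ifs with h
    · exact Nat.mod_eq_of_lt h
    · rw [Nat.mod_eq_sub_mod (by omega)]; exact Nat.mod_eq_of_lt (by omega)
  rw [hjk]
  split_ifs <;> omega

-- ===== main characterisations =====
theorem a_getElem (xs : List Int) (k : Nat) (hk : k < xs.length) (j : Nat) (hj : j < xs.length)
    (koff : (PySem.List.enumerate xs 0).foldl (fun off p => if p.2 = 0 then p.1 else off) 0 = (k : Int)) :
    (rotate_left_till_zero_v3 xs)[j]? = xs[(j + k) % xs.length]? := by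
  unfold rotate_left_till_zero_v3
  simp only [koff]
  rw [foldl_set_getElem?
      (fun p : Int × Int => (PySem.Int.mod (p.1 - (k : Int) + (xs.length : Int)) (xs.length : Int)).toNat)
      (fun p => p.2) _ _ j (by simpa using hj)]
  set n := xs.length with hn
  have hnpos : 0 < n := Nat.zero_lt_of_lt (hn ▸ hk)
  have hi : (j + k) % n < n := Nat.mod_lt _ hnpos
  have hfind :
      (PySem.List.enumerate xs 0).reverse.find?
        (fun p : Int × Int => (PySem.Int.mod (p.1 - (k : Int) + (n : Int)) (n : Int)).toNat == j) =
      some ((((j + k) % n : Nat) : Int), xs[(j + k) % n]) := by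
    apply find?_of_unique
    · rw [List.mem_reverse, PySem.List.mem_enumerate_iff]
      exact ⟨(j + k) % n, hi, by simp⟩
    · simp only [beq_iff_eq]
      rw [PySem.Int.mod_eq_emod_of_pos (by exact_mod_cast hnpos)]
      have := (placement_eq_iff ((j + k) % n) k j n hi hk hj).mpr rfl
      omega
    · rintro ⟨yi, yv⟩ hy hpy
      rw [List.mem_reverse, PySem.List.mem_enumerate_iff] at hy
      obtain ⟨m, hm, heq⟩ := hy
      simp only [beq_iff_eq] at hpy
      have hyi : yi = (m : Int) := by simpa using congrArg Prod.fst heq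
      rw [PySem.Int.mod_eq_emod_of_pos (by exact_mod_cast hnpos), hyi] at hpy
      have hmod : ((m : Int) - (k : Int) + (n : Int)) % (n : Int) = (j : Int) := by
        have hnn : (0:Int) ≤ ((m : Int) - (k : Int) + (n : Int)) % (n : Int) :=
          Int.emod_nonneg _ (by omega)
        omega
      have hmjk : m = (j + k) % n := (placement_eq_iff m k j n hm hk hj).mp hmod
      subst hmjk
      rw [heq]
      simp
  rw [hfind]
  simp [List.getElem?_eq_getElem hi]

theorem b_getElem (xs : List Int) (k : Nat) (hk : k < xs.length) (j : Nat) (hj : j < xs.length) :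
    (xs.drop k ++ xs.take k)[j]? = xs[(j + k) % xs.length]? := by
  set n := xs.length with hn
  have hdl : (xs.drop k).length = n - k := by simp [hn]
  by_cases h : j < n - k
  · rw [List.getElem?_append_left (by omega)]
    rw [List.getElem?_drop]
    congr 1
    rw [Nat.mod_eq_of_lt (by omega)]
    omega
  · rw [List.getElem?_append_right (by omega)]
    rw [hdl, List.getElem?_take]
    have hlt : j - (n - k) < k := by omega
    rw [if_pos hlt]
    congr 1
    rw [Nat.mod_eq_sub_mod (by omega), Nat.mod_eq_of_lt (by omega)]
    omega

theorem a_length (xs : List Int) :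
    (rotate_left_till_zero_v3 xs).length = xs.length := by
  unfold rotate_left_till_zero_v3
  rw [length_foldl_set]
  simp

-- ===== VERDICT (by name: the statement is the Claim_ definition above) =====
theorem rotate_left_till_zero_v3_spec : Claim_equal_rotate_left_till_zero_v3 := by
  intro xs _
  show rotate_left_till_zero_v3 xs = rotate_left_till_zero_v3_alt xs
  obtain ⟨k, hk, koff⟩ := offset_range xs
  have halt : rotate_left_till_zero_v3_alt xs = xs.drop k ++ xs.take k := by
    unfold rotate_left_till_zero_v3_alt
    simp only [koff]
    rw [PySem.List.slice_from_natCast, PySem.List.slice_to_natCast]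
  rcases hk with hk | ⟨hk0, hlen0⟩
  · rw [halt]
    apply List.ext_getElem?
    intro j
    by_cases hj : j < xs.length
    · rw [a_getElem xs k hk j hj koff, b_getElem xs k hk j hj]
    · rw [List.getElem?_eq_none, List.getElem?_eq_none]
      · simp; omega
      · rw [a_length]; omega
  · have hxs : xs = [] := List.eq_nil_of_length_eq_zero hlen0
    subst hxs
    simp [rotate_left_till_zero_v3, rotate_left_till_zero_v3_alt,
      PySem.List.enumerate_nil, PySem.List.slice]
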